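-- pv_equiv track=rewrite | github.com/alexh-scrt/ai-talks | parse_quote_corpus.py | classify_author_metadata
-- ===== SOURCE A (Python) =====
-- from typing import List, Dict, Set, Tuple
--
-- def classify_author_metadata(author: str, field: str) -> Dict[str, str]:
--     """Classify author by era and tradition for metadata"""
--     author_lower = author.lower()
--     field_lower = field.lower()
--
--     # Era classification
--     era = 'contemporary'  # default
--     if any(name in author_lower for name in ['aristotle', 'plato', 'socrates', 'confucius', 'buddha', 'lao']):
--         era = 'ancient'
--     elif any(name in author_lower for name in ['descartes', 'kant', 'hume', 'spinoza', 'locke']):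
--         era = 'modern'
--     elif any(name in author_lower for name in ['nietzsche', 'sartre', 'wittgenstein', 'russell']):
--         era = 'contemporary'
--
--     # Tradition classification
--     tradition = 'western'  # default
--     if any(indicator in field_lower for indicator in ['buddhism', 'taoism', 'confucianism', 'zen']):
--         tradition = 'eastern'
--     elif any(indicator in field_lower for indicator in ['islamic', 'sufism', 'jewish']):
--         tradition = 'other'
--
--     return {'era': era, 'tradition': tradition}
-- ===== SOURCE B (Python) =====
-- # B: single left-to-right scan of the text collecting the set of matched labels
-- # (multi-pattern matching at each position), then a tiny final choice among labels.
--
-- _ERA_KW = {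
--     'aristotle': 'ancient', 'plato': 'ancient', 'socrates': 'ancient',
--     'confucius': 'ancient', 'buddha': 'ancient', 'lao': 'ancient',
--     'descartes': 'modern', 'kant': 'modern', 'hume': 'modern',
--     'spinoza': 'modern', 'locke': 'modern',
--     'nietzsche': 'contemporary', 'sartre': 'contemporary',
--     'wittgenstein': 'contemporary', 'russell': 'contemporary',
-- }
--
-- _TRAD_KW = {
--     'buddhism': 'eastern', 'taoism': 'eastern', 'confucianism': 'eastern',
--     'zen': 'eastern',
--     'islamic': 'other', 'sufism': 'other', 'jewish': 'other',
-- }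
--
--
-- def _matched_labels(text, table):
--     labels = set()
--     for i in range(len(text)):
--         for kw, label in table.items():
--             if text.startswith(kw, i):
--                 labels.add(label)
--     return labels
--
--
-- def classify_author_metadata(author: str, field: str) -> dict:
--     era_hits = _matched_labels(author.lower(), _ERA_KW)
--     trad_hits = _matched_labels(field.lower(), _TRAD_KW)
--     era = 'ancient' if 'ancient' in era_hits else 'modern' if 'modern' in era_hits else 'contemporary'
--     tradition = 'eastern' if 'eastern' in trad_hits else 'other' if 'other' in trad_hits else 'western'
--     return {'era': era, 'tradition': tradition}
-- ===== Notes on version B (the rewrite author's own statement) =====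
-- stated objective: alternative
-- what changed: B replaces the keyword-by-keyword containment if/elif chains with a single left-to-right positional scan of each lowered text that collects the set of matched category labels (multi-pattern matching per position), followed by a tiny fixed choice among the collected labels.
import Mathlib
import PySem

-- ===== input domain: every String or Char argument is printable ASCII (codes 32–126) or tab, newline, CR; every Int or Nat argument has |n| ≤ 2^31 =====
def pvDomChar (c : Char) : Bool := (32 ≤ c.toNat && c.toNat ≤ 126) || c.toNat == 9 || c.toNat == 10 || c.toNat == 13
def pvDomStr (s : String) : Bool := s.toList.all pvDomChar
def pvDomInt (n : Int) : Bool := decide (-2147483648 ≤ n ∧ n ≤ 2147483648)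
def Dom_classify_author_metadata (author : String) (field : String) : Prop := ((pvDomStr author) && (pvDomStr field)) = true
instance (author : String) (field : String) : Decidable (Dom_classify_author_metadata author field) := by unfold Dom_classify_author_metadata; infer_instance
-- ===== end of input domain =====

-- B scans each lowered text once, position by position, collecting the SET of matched
-- category labels, then picks the label by a fixed small choice; objective: alternative.

-- ===== PORT A =====
def classify_author_metadata (author : String) (field : String) : List (String × String) :=
  let author_lower := PySem.Str.lower author
  let field_lower := PySem.Str.lower field
  let era :=
    if ["aristotle", "plato", "socrates", "confucius", "buddha", "lao"].any
        (fun name => PySem.Str.isIn name author_lower) then "ancient"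
    else if ["descartes", "kant", "hume", "spinoza", "locke"].any
        (fun name => PySem.Str.isIn name author_lower) then "modern"
    else if ["nietzsche", "sartre", "wittgenstein", "russell"].any
        (fun name => PySem.Str.isIn name author_lower) then "contemporary"
    else "contemporary"
  let tradition :=
    if ["buddhism", "taoism", "confucianism", "zen"].any
        (fun ind => PySem.Str.isIn ind field_lower) then "eastern"
    else if ["islamic", "sufism", "jewish"].any
        (fun ind => PySem.Str.isIn ind field_lower) then "other"
    else "western"
  [("era", era), ("tradition", tradition)]

-- ===== PORT B =====
def pvEraKw : List (String × String) :=
  [("aristotle", "ancient"), ("plato", "ancient"), ("socrates", "ancient"),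
   ("confucius", "ancient"), ("buddha", "ancient"), ("lao", "ancient"),
   ("descartes", "modern"), ("kant", "modern"), ("hume", "modern"),
   ("spinoza", "modern"), ("locke", "modern"),
   ("nietzsche", "contemporary"), ("sartre", "contemporary"),
   ("wittgenstein", "contemporary"), ("russell", "contemporary")]

def pvTradKw : List (String × String) :=
  [("buddhism", "eastern"), ("taoism", "eastern"), ("confucianism", "eastern"),
   ("zen", "eastern"),
   ("islamic", "other"), ("sufism", "other"), ("jewish", "other")]

-- _matched_labels: for i in range(len(text)): for kw, label in table: if text.startswith(kw, i): labels.add(label)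
def pvMatchedLabels (text : List Char) (table : List (String × String)) : PySem.Set String :=
  (List.range text.length).foldl (fun labels i =>
    table.foldl (fun labels kv =>
      if PySem.Chars.startswith (text.drop i) kv.1.toList then PySem.Set.add labels kv.2
      else labels) labels) PySem.Set.empty

def classify_author_metadata_alt (author : String) (field : String) : List (String × String) :=
  let eraHits := pvMatchedLabels (PySem.Str.lower author).toList pvEraKw
  let tradHits := pvMatchedLabels (PySem.Str.lower field).toList pvTradKw
  let era :=
    if PySem.Set.contains eraHits "ancient" then "ancient"
    else if PySem.Set.contains eraHits "modern" then "modern"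
    else "contemporary"
  let tradition :=
    if PySem.Set.contains tradHits "eastern" then "eastern"
    else if PySem.Set.contains tradHits "other" then "other"
    else "western"
  [("era", era), ("tradition", tradition)]

-- ===== PRECONDITION & SPEC =====
def Spec_classify_author_metadata (author : String) (field : String) (out : List (String × String)) : Prop := out = classify_author_metadata_alt author field
instance (author : String) (field : String) (out : List (String × String)) : Decidable (Spec_classify_author_metadata author field out) := by unfold Spec_classify_author_metadata; infer_instance

-- ===== CLAIM =====
def Claim_equal_classify_author_metadata : Prop := ∀ (author : String) (field : String), Dom_classify_author_metadata author field → Spec_classify_author_metadata author field (classify_author_metadata author field)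

-- ===== LEMMAS AND PROOFS =====

lemma mem_inner (t : List Char) (i : Nat) (table : List (String × String))
    (s : List String) (x : String) :
    x ∈ table.foldl (fun labels kv =>
        if PySem.Chars.startswith (t.drop i) kv.1.toList then PySem.Set.add labels kv.2
        else labels) s ↔
      x ∈ s ∨ ∃ kv ∈ table, PySem.Chars.startswith (t.drop i) kv.1.toList = true ∧ x = kv.2 := by
  induction table generalizing s with
  | nil => simp
  | cons kv rest ih =>
    simp only [List.foldl_cons]
    rw [ih]
    cases hb : PySem.Chars.startswith (t.drop i) kv.1.toList with
    | true => simp [hb, PySem.Set.mem_add]; tauto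
    | false => simp [hb]

lemma mem_outer (t : List Char) (table : List (String × String))
    (idxs : List Nat) (s : List String) (x : String) :
    x ∈ idxs.foldl (fun labels i =>
        table.foldl (fun labels kv =>
          if PySem.Chars.startswith (t.drop i) kv.1.toList then PySem.Set.add labels kv.2
          else labels) labels) s ↔
      x ∈ s ∨ ∃ i ∈ idxs, ∃ kv ∈ table,
        PySem.Chars.startswith (t.drop i) kv.1.toList = true ∧ x = kv.2 := by
  induction idxs generalizing s with
  | nil => simp
  | cons i rest ih =>
    simp only [List.foldl_cons]
    rw [ih, mem_inner]
    constructor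
    · rintro (((h | ⟨kv, hkv, hsw, hx⟩) | ⟨j, hj, kv, hkv, hsw, hx⟩))
      · exact Or.inl h
      · exact Or.inr ⟨i, by simp, kv, hkv, hsw, hx⟩
      · exact Or.inr ⟨j, by simp [hj], kv, hkv, hsw, hx⟩
    · rintro (h | ⟨j, hj, kv, hkv, hsw, hx⟩)
      · exact Or.inl (Or.inl h)
      · rcases List.mem_cons.mp hj with rfl | hj'
        · exact Or.inl (Or.inr ⟨kv, hkv, hsw, hx⟩)
        · exact Or.inr ⟨j, hj', kv, hkv, hsw, hx⟩

lemma exists_range_startswith (t kw : List Char) (h : kw ≠ []) :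
    (∃ i ∈ List.range t.length, PySem.Chars.startswith (t.drop i) kw = true) ↔
      PySem.Chars.isIn kw t = true := by
  rw [← PySem.Chars.exists_prefix_drop_iff_isIn]
  constructor
  · rintro ⟨i, -, hi⟩
    exact ⟨i, (PySem.Chars.startswith_iff _ _).mp hi⟩
  · rintro ⟨j, hj⟩
    by_cases hlt : j < t.length
    · exact ⟨j, List.mem_range.mpr hlt, (PySem.Chars.startswith_iff _ _).mpr hj⟩
    · exfalso
      have hd : t.drop j = [] := List.drop_eq_nil_of_le (by omega)
      rw [hd] at hj
      exact h (List.prefix_nil.mp hj)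

lemma mem_matched (t : List Char) (table : List (String × String))
    (hne : ∀ kv ∈ table, kv.1.toList ≠ []) (x : String) :
    x ∈ pvMatchedLabels t table ↔
      ∃ kv ∈ table, x = kv.2 ∧ PySem.Chars.isIn kv.1.toList t = true := by
  unfold pvMatchedLabels
  rw [mem_outer]
  simp only [PySem.Set.empty, List.not_mem_nil, false_or]
  constructor
  · rintro ⟨i, hi, kv, hkv, hsw, hx⟩
    exact ⟨kv, hkv, hx, (exists_range_startswith t kv.1.toList (hne kv hkv)).mp ⟨i, hi, hsw⟩⟩
  · rintro ⟨kv, hkv, hx, hin⟩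
    obtain ⟨i, hi, hsw⟩ := (exists_range_startswith t kv.1.toList (hne kv hkv)).mpr hin
    exact ⟨i, hi, kv, hkv, hsw, hx⟩

lemma contains_era_ancient (t : List Char) :
    PySem.Set.contains (pvMatchedLabels t pvEraKw) "ancient" =
      (PySem.Chars.isIn "aristotle".toList t || PySem.Chars.isIn "plato".toList t ||
       PySem.Chars.isIn "socrates".toList t || PySem.Chars.isIn "confucius".toList t ||
       PySem.Chars.isIn "buddha".toList t || PySem.Chars.isIn "lao".toList t) := by
  rw [Bool.eq_iff_iff, PySem.Set.contains_iff, mem_matched _ _ (by decide)]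
  simp [pvEraKw]
  tauto

lemma contains_era_modern (t : List Char) :
    PySem.Set.contains (pvMatchedLabels t pvEraKw) "modern" =
      (PySem.Chars.isIn "descartes".toList t || PySem.Chars.isIn "kant".toList t ||
       PySem.Chars.isIn "hume".toList t || PySem.Chars.isIn "spinoza".toList t ||
       PySem.Chars.isIn "locke".toList t) := by
  rw [Bool.eq_iff_iff, PySem.Set.contains_iff, mem_matched _ _ (by decide)]
  simp [pvEraKw]
  tauto

lemma contains_trad_eastern (t : List Char) :
    PySem.Set.contains (pvMatchedLabels t pvTradKw) "eastern" =
      (PySem.Chars.isIn "buddhism".toList t || PySem.Chars.isIn "taoism".toList t ||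
       PySem.Chars.isIn "confucianism".toList t || PySem.Chars.isIn "zen".toList t) := by
  rw [Bool.eq_iff_iff, PySem.Set.contains_iff, mem_matched _ _ (by decide)]
  simp [pvTradKw]
  tauto

lemma contains_trad_other (t : List Char) :
    PySem.Set.contains (pvMatchedLabels t pvTradKw) "other" =
      (PySem.Chars.isIn "islamic".toList t || PySem.Chars.isIn "sufism".toList t ||
       PySem.Chars.isIn "jewish".toList t) := by
  rw [Bool.eq_iff_iff, PySem.Set.contains_iff, mem_matched _ _ (by decide)]
  simp [pvTradKw]
  tauto

-- ===== VERDICT =====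
theorem classify_author_metadata_spec : Claim_equal_classify_author_metadata := by
  intro author field _
  unfold Spec_classify_author_metadata classify_author_metadata classify_author_metadata_alt
  simp only [contains_era_ancient, contains_era_modern, contains_trad_eastern,
    contains_trad_other, List.any_cons, List.any_nil, PySem.Str.isIn_eq]
  simp [ite_self, Bool.or_assoc]
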